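-- pv_equiv track=rewrite | github.com/praekelt/praekelt-payment | praekeltpayment/flickswitch/utils.py | get_network_operator
-- ===== SOURCE A (Python) =====
-- def get_network_operator(msisdn):
--     mapping = (
--         ('2783', 'MTN'),
--         ('2773', 'MTN'),
--         ('2778', 'MTN'),
--         ('27710', 'MTN'),
--         ('27717', 'MTN'),
--         ('27718', 'MTN'),
--         ('27719', 'MTN'),
--         ('2782', 'VOD'),
--         ('2772', 'VOD'),
--         ('2776', 'VOD'),
--         ('2779', 'VOD'),
--         ('27711', 'VOD'),
--         ('27712', 'VOD'),
--         ('27713', 'VOD'),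
--         ('27714', 'VOD'),
--         ('27715', 'VOD'),
--         ('27716', 'VOD'),
--         ('2784', 'CELLC'),
--         ('2774', 'CELLC'),
--         ('27811', '8TA'),
--         ('27812', '8TA'),
--         ('27813', '8TA'),
--         ('27814', '8TA'),
--         )
--
--     for prefix, op in mapping:
--         if msisdn.startswith(prefix):
--             return op
--     return None
-- ===== SOURCE B (Python) =====
-- def get_network_operator(msisdn):
--     # Decision tree on successive characters; correct because all mapping
--     # prefixes share their first two characters and are determined by chars 2-4.
--     if not msisdn.startswith('27') or len(msisdn) < 4:
--         return None
--     c, d = msisdn[2], msisdn[3]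
--     if c == '7':
--         if d == '1':
--             if len(msisdn) < 5:
--                 return None
--             e = msisdn[4]
--             if e in '0789':
--                 return 'MTN'
--             if e in '123456':
--                 return 'VOD'
--             return None
--         if d in '38':
--             return 'MTN'
--         if d in '269':
--             return 'VOD'
--         if d == '4':
--             return 'CELLC'
--         return None
--     if c == '8':
--         if d == '3':
--             return 'MTN'
--         if d == '2':
--             return 'VOD'
--         if d == '4':
--             return 'CELLC'
--         if d == '1':
--             if len(msisdn) >= 5 and msisdn[4] in '1234':
--                 return '8TA'
--         return None
--     return None
-- ===== Notes on version B (the rewrite author's own statement) =====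
-- stated objective: simpler
-- what changed: The 23-entry linear scan with startswith is replaced by a prefix decision tree: one shared-prefix check plus branching on characters 2, 3 and (when needed) 4; correct because all mapping prefixes share their first two characters and no two entries can match the same string.
import Mathlib
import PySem

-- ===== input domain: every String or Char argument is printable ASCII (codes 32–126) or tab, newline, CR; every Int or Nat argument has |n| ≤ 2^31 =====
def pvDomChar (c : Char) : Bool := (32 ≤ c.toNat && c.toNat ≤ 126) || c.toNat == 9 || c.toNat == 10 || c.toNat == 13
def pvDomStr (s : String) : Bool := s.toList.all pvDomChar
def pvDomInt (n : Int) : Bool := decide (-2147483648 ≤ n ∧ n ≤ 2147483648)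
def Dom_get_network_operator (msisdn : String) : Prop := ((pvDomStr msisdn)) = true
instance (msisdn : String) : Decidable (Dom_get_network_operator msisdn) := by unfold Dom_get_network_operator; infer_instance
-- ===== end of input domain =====

-- B replaces A's 23-entry startswith scan by a character decision tree on characters 0-4 (simpler; exact because all mapping prefixes share their first two characters and are determined by characters 2-4).

-- ===== PORT A =====
def pvMappingA : List (String × String) :=
  [("2783", "MTN"), ("2773", "MTN"), ("2778", "MTN"),
   ("27710", "MTN"), ("27717", "MTN"), ("27718", "MTN"), ("27719", "MTN"),
   ("2782", "VOD"), ("2772", "VOD"), ("2776", "VOD"), ("2779", "VOD"),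
   ("27711", "VOD"), ("27712", "VOD"), ("27713", "VOD"), ("27714", "VOD"),
   ("27715", "VOD"), ("27716", "VOD"),
   ("2784", "CELLC"), ("2774", "CELLC"),
   ("27811", "8TA"), ("27812", "8TA"), ("27813", "8TA"), ("27814", "8TA")]

-- A's for-loop with early return, as structural recursion over the mapping
def pvScanA (m : String) : List (String × String) → Option String
  | [] => none
  | (pre, op) :: rest => if PySem.Str.startswith m pre then some op else pvScanA m rest

def get_network_operator (msisdn : String) : Option String :=
  pvScanA msisdn pvMappingA

-- ===== PORT B =====
def get_network_operator_alt (msisdn : String) : Option String :=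
  if ¬ PySem.Str.startswith msisdn "27" ∨ PySem.Str.len msisdn < 4 then none
  else
    match PySem.Str.pyGet? msisdn 2, PySem.Str.pyGet? msisdn 3 with
    | some c, some d =>
      if c = '7' then
        if d = '1' then
          if PySem.Str.len msisdn < 5 then none
          else
            match PySem.Str.pyGet? msisdn 4 with
            | some e =>
              if e = '0' ∨ e = '7' ∨ e = '8' ∨ e = '9' then some "MTN"
              else if e = '1' ∨ e = '2' ∨ e = '3' ∨ e = '4' ∨ e = '5' ∨ e = '6' then some "VOD"
              else none
            | none => none
        else if d = '3' ∨ d = '8' then some "MTN"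
        else if d = '2' ∨ d = '6' ∨ d = '9' then some "VOD"
        else if d = '4' then some "CELLC"
        else none
      else if c = '8' then
        if d = '3' then some "MTN"
        else if d = '2' then some "VOD"
        else if d = '4' then some "CELLC"
        else if d = '1' then
          if 5 ≤ PySem.Str.len msisdn then
            match PySem.Str.pyGet? msisdn 4 with
            | some e => if e = '1' ∨ e = '2' ∨ e = '3' ∨ e = '4' then some "8TA" else none
            | none => none
          else none
        else none
      else none
    | _, _ => none

-- ===== PRECONDITION & SPEC =====
def Spec_get_network_operator (msisdn : String) (out : Option String) : Prop := out = get_network_operator_alt msisdn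
instance (msisdn : String) (out : Option String) : Decidable (Spec_get_network_operator msisdn out) := by unfold Spec_get_network_operator; infer_instance

-- ===== CLAIM (what is proved, stated in full; the proofs are below) =====
def Claim_equal_get_network_operator : Prop := ∀ (msisdn : String), Dom_get_network_operator msisdn → Spec_get_network_operator msisdn (get_network_operator msisdn)

-- ===== LEMMAS AND PROOFS =====

lemma pvSW (m p : String) : (PySem.Str.startswith m p = true) ↔ p.toList <+: m.toList := by
  simp [pysem]

lemma pvG (m : String) (l : List Char) (h : m.toList = l) (i : Int)
    (h0 : 0 ≤ i) (_hl : i < l.length) : PySem.Str.pyGet? m i = l[i.toNat]? := by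
  simp only [PySem.Str.pyGet?, h]
  rw [show i = ((i.toNat : Nat) : Int) by omega]
  simp [pysem]

lemma pvGnone (m : String) (l : List Char) (h : m.toList = l) (i : Int)
    (hl : (l.length : Int) ≤ i) : PySem.Str.pyGet? m i = none := by
  simp only [PySem.Str.pyGet?, h]
  rw [show i = ((i.toNat : Nat) : Int) by omega]
  simp [pysem]
  omega

-- ===== VERDICT (by name: the statement is the Claim_ definition above) =====
set_option maxHeartbeats 1600000 in
theorem get_network_operator_spec : Claim_equal_get_network_operator := by
  intro msisdn _
  unfold Spec_get_network_operator
  rcases h : msisdn.toList with _ | ⟨a, _ | ⟨b, _ | ⟨c, _ | ⟨d, _ | ⟨e, r⟩⟩⟩⟩⟩ <;>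
    simp only [get_network_operator, pvScanA, pvMappingA, get_network_operator_alt,
      pvSW, PySem.Str.len_eq, h]
  · simp [List.cons_prefix_iff] <;> omega
  · simp [List.cons_prefix_iff] <;> omega
  · simp [List.cons_prefix_iff] <;> omega
  · simp [List.cons_prefix_iff] <;> omega
  -- length-4 case: msisdn.toList = [a, b, c, d]
  · by_cases ha : a = '2'
    case neg => simp [List.cons_prefix_iff, ha]
    subst ha
    by_cases hb : b = '7'
    case neg => simp [List.cons_prefix_iff, hb]
    subst hb
    rw [pvG msisdn _ h 2 (by omega) (by simp <;> omega), pvG msisdn _ h 3 (by omega) (by simp <;> omega),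
        pvGnone msisdn _ h 4 (by simp <;> omega)]
    by_cases hc7 : c = '7'
    · subst hc7
      by_cases hd1 : d = '1'
      · subst hd1; simp [List.cons_prefix_iff] <;> omega
      · by_cases hd3 : d = '3'
        · subst hd3; simp [List.cons_prefix_iff] <;> omega
        · by_cases hd8 : d = '8'
          · subst hd8; simp [List.cons_prefix_iff] <;> omega
          · by_cases hd2 : d = '2'
            · subst hd2; simp [List.cons_prefix_iff] <;> omega
            · by_cases hd6 : d = '6'
              · subst hd6; simp [List.cons_prefix_iff] <;> omega
              · by_cases hd9 : d = '9'
                · subst hd9; simp [List.cons_prefix_iff] <;> omega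
                · by_cases hd4 : d = '4'
                  · subst hd4; simp [List.cons_prefix_iff] <;> omega
                  · simp [List.cons_prefix_iff, hd1, hd3, hd8, hd2, hd6, hd9, hd4]
    · by_cases hc8 : c = '8'
      · subst hc8
        by_cases hd3 : d = '3'
        · subst hd3; simp [List.cons_prefix_iff] <;> omega
        · by_cases hd2 : d = '2'
          · subst hd2; simp [List.cons_prefix_iff] <;> omega
          · by_cases hd4 : d = '4'
            · subst hd4; simp [List.cons_prefix_iff] <;> omega
            · by_cases hd1 : d = '1'
              · subst hd1; simp [List.cons_prefix_iff] <;> omega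
              · simp [List.cons_prefix_iff, hd3, hd2, hd4, hd1]
      · simp [List.cons_prefix_iff, hc7, hc8]
  -- length ≥ 5 case: msisdn.toList = a :: b :: c :: d :: e :: r
  · by_cases ha : a = '2'
    case neg => simp [List.cons_prefix_iff, ha]
    subst ha
    by_cases hb : b = '7'
    case neg => simp [List.cons_prefix_iff, hb]
    subst hb
    rw [pvG msisdn _ h 2 (by omega) (by simp <;> omega), pvG msisdn _ h 3 (by omega) (by simp <;> omega),
        pvG msisdn _ h 4 (by omega) (by simp <;> omega)]
    by_cases hc7 : c = '7'
    · subst hc7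
      by_cases hd1 : d = '1'
      · subst hd1
        by_cases he0 : e = '0'
        · subst he0; simp [List.cons_prefix_iff] <;> omega
        · by_cases he7 : e = '7'
          · subst he7; simp [List.cons_prefix_iff] <;> omega
          · by_cases he8 : e = '8'
            · subst he8; simp [List.cons_prefix_iff] <;> omega
            · by_cases he9 : e = '9'
              · subst he9; simp [List.cons_prefix_iff] <;> omega
              · by_cases he1 : e = '1'
                · subst he1; simp [List.cons_prefix_iff] <;> omega
                · by_cases he2 : e = '2'
                  · subst he2; simp [List.cons_prefix_iff] <;> omega
                  · by_cases he3 : e = '3'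
                    · subst he3; simp [List.cons_prefix_iff] <;> omega
                    · by_cases he4 : e = '4'
                      · subst he4; simp [List.cons_prefix_iff] <;> omega
                      · by_cases he5 : e = '5'
                        · subst he5; simp [List.cons_prefix_iff] <;> omega
                        · by_cases he6 : e = '6'
                          · subst he6; simp [List.cons_prefix_iff] <;> omega
                          · simp [List.cons_prefix_iff, he0, he7, he8, he9, he1, he2, he3, he4, he5, he6]
      · by_cases hd3 : d = '3'
        · subst hd3; simp [List.cons_prefix_iff] <;> omega
        · by_cases hd8 : d = '8'
          · subst hd8; simp [List.cons_prefix_iff] <;> omega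
          · by_cases hd2 : d = '2'
            · subst hd2; simp [List.cons_prefix_iff] <;> omega
            · by_cases hd6 : d = '6'
              · subst hd6; simp [List.cons_prefix_iff] <;> omega
              · by_cases hd9 : d = '9'
                · subst hd9; simp [List.cons_prefix_iff] <;> omega
                · by_cases hd4 : d = '4'
                  · subst hd4; simp [List.cons_prefix_iff] <;> omega
                  · simp [List.cons_prefix_iff, hd1, hd3, hd8, hd2, hd6, hd9, hd4]
    · by_cases hc8 : c = '8'
      · subst hc8
        by_cases hd3 : d = '3'
        · subst hd3; simp [List.cons_prefix_iff] <;> omega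
        · by_cases hd2 : d = '2'
          · subst hd2; simp [List.cons_prefix_iff] <;> omega
          · by_cases hd4 : d = '4'
            · subst hd4; simp [List.cons_prefix_iff] <;> omega
            · by_cases hd1 : d = '1'
              · subst hd1
                by_cases he1 : e = '1'
                · subst he1; simp [List.cons_prefix_iff] <;> omega
                · by_cases he2 : e = '2'
                  · subst he2; simp [List.cons_prefix_iff] <;> omega
                  · by_cases he3 : e = '3'
                    · subst he3; simp [List.cons_prefix_iff] <;> omega
                    · by_cases he4 : e = '4'
                      · subst he4; simp [List.cons_prefix_iff] <;> omega
                      · simp [List.cons_prefix_iff, he1, he2, he3, he4]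
              · simp [List.cons_prefix_iff, hd3, hd2, hd4, hd1]
      · simp [List.cons_prefix_iff, hc7, hc8]
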